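-- pv_equiv track=rewrite | github.com/vladimirbarikov/github_repository | py_projects/collections/tuple_practice_2.py | sorted_tickets
-- ===== SOURCE A (Python) =====
-- def sorted_tickets(types, tickets):
--     sorted_list_zh = []
--     sorted_list_k = []
--     sorted_list_z = []
--     zh = ord(types[0])
--     k = ord(types[1])
--     z = ord(types[2])
--     for elem in tickets:
--         if ord(elem) == zh:
--             sorted_list_zh.append(elem)
--         elif ord(elem) == k:
--             sorted_list_k.append(elem)
--         elif ord(elem) == z:
--             sorted_list_z.append(elem)
--     output = sorted_list_zh + sorted_list_k + sorted_list_z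
--     return output
-- ===== SOURCE B (Python) =====
-- def sorted_tickets(types, tickets):
--     rank = {}
--     for i in range(3):
--         rank.setdefault(ord(types[i]), i)
--     return sorted((e for e in tickets if ord(e) in rank),
--                   key=lambda e: rank[ord(e)])
-- ===== Notes on version B (the rewrite author's own statement) =====
-- stated objective: alternative
-- what changed: Replaces the three explicit append-buckets and their concatenation by a rank table built with setdefault (first type wins on duplicate ordinals) plus a single stable sort of the filtered tickets by that rank.
import Mathlib
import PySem

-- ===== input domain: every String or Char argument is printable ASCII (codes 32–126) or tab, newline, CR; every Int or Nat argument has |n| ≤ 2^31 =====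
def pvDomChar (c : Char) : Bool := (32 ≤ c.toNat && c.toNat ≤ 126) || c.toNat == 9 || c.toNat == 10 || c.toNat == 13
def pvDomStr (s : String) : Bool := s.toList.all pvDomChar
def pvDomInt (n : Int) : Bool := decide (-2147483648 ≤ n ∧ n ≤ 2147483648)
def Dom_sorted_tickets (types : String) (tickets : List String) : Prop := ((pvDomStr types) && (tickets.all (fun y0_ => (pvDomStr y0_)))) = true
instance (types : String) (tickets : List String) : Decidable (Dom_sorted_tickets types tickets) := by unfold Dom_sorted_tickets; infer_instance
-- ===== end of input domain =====

-- B replaces A's three append-buckets + concatenation by a setdefault rank table and one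
-- stable sort of the filtered tickets by rank (objective: alternative, not faster).

-- ===== PORT A =====
-- ord(s): exact for Python — some codepoint iff s is a single character, none = TypeError
def pyOrd? (s : String) : Option Int :=
  match s.toList with
  | [c] => some (c.toNat : Int)
  | _ => none

def sorted_tickets (types : String) (tickets : List String) : List String :=
  match PySem.Str.pyGet? types 0, PySem.Str.pyGet? types 1, PySem.Str.pyGet? types 2 with
  | some czh, some ck, some cz =>
    let zh : Int := (czh.toNat : Int)
    let k : Int := (ck.toNat : Int)
    let z : Int := (cz.toNat : Int)
    let st := tickets.foldl (fun (st : List String × List String × List String) elem =>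
      match pyOrd? elem with
      | some o =>
        if o = zh then (st.1 ++ [elem], st.2.1, st.2.2)
        else if o = k then (st.1, st.2.1 ++ [elem], st.2.2)
        else if o = z then (st.1, st.2.1, st.2.2 ++ [elem])
        else st
      | none => st)  -- ord(elem) raises TypeError in Python: excluded by Pre_
      ([], [], [])
    st.1 ++ st.2.1 ++ st.2.2
  | _, _, _ => []  -- types[0..2] IndexError in Python: excluded by Pre_

-- ===== PORT B =====
def sorted_tickets_alt (types : String) (tickets : List String) : List String :=
  let rank := (PySem.List.pyRange 0 3 1).foldl (fun (d : PySem.Dict Int Int) i =>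
      match PySem.Str.pyGet? types i with
      | some c => d.setdefault (c.toNat : Int) i
      | none => d)  -- types[i] IndexError: excluded by Pre_
    PySem.Dict.empty
  let filtered := tickets.filter (fun e =>
      match pyOrd? e with
      | some o => rank.contains o
      | none => false)  -- ord(e) TypeError: excluded by Pre_
  PySem.List.sorted filtered (fun e => rank.getD ((pyOrd? e).getD 0) 0) false
  -- key lambda is rank[ord(e)]; on the filtered list the key is always present, so getD is exact

-- ===== PRECONDITION & SPEC =====
-- Pre_ = exactly the inputs where Python A returns: types has the three indexed positions
-- (else IndexError) and every ticket is a single character (else ord raises TypeError).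
def Pre_sorted_tickets (types : String) (tickets : List String) : Prop :=
  3 ≤ types.toList.length ∧ ∀ t ∈ tickets, t.toList.length = 1
instance (types : String) (tickets : List String) : Decidable (Pre_sorted_tickets types tickets) := by unfold Pre_sorted_tickets; infer_instance

def pvWitness_sorted_tickets : String × List String := ("abc", ["b", "a", "c", "a", "x"])

def Spec_sorted_tickets (types : String) (tickets : List String) (out : List String) : Prop := out = sorted_tickets_alt types tickets
instance (types : String) (tickets : List String) (out : List String) : Decidable (Spec_sorted_tickets types tickets out) := by unfold Spec_sorted_tickets; infer_instance

-- ===== CLAIM (what is proved, stated in full; the proofs are below) =====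
def Claim_equal_sorted_tickets : Prop := ∀ (types : String) (tickets : List String), Dom_sorted_tickets types tickets → Pre_sorted_tickets types tickets → Spec_sorted_tickets types tickets (sorted_tickets types tickets)

-- ===== LEMMAS AND PROOFS =====

-- insertBy structural facts specific to this proof's bucket shape
theorem insertBy_pass {α : Type} (before : α → α → Bool) (x : α) :
    ∀ (a b : List α), (∀ y ∈ a, before x y = false) →
      PySem.List.insertBy before x (a ++ b) = a ++ PySem.List.insertBy before x b := by
  intro a
  induction a with
  | nil => intro b _; simp
  | cons y t ih =>
    intro b h
    have hy : before x y = false := h y (by simp)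
    simp [PySem.List.insertBy, hy]
    exact ih b (fun y' hy' => h y' (by simp [hy']))

theorem insertBy_front {α : Type} (before : α → α → Bool) (x : α) :
    ∀ (b : List α), (∀ y ∈ b, before x y = true) →
      PySem.List.insertBy before x b = x :: b := by
  intro b h
  cases b with
  | nil => simp [PySem.List.insertBy]
  | cons y t => simp [PySem.List.insertBy, h y (by simp)]

-- a stable sort whose keys all lie in {0,1,2} is the concatenation of the three key-buckets
theorem sorted_three_aux {α : Type} (key : α → Int) :
    ∀ (l a0 a1 a2 : List α),
      (∀ x ∈ a0, key x = 0) → (∀ x ∈ a1, key x = 1) → (∀ x ∈ a2, key x = 2) →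
      (∀ x ∈ l, key x = 0 ∨ key x = 1 ∨ key x = 2) →
      l.foldl (fun acc x => PySem.List.insertBy (fun a b => decide (key a < key b)) x acc) (a0 ++ a1 ++ a2)
        = (a0 ++ l.filter (fun x => key x == 0)) ++ (a1 ++ l.filter (fun x => key x == 1))
            ++ (a2 ++ l.filter (fun x => key x == 2)) := by
  intro l
  induction l with
  | nil => intro a0 a1 a2 _ _ _ _; simp
  | cons x t ih =>
    intro a0 a1 a2 h0 h1 h2 hl
    have hx := hl x (by simp)
    have ht : ∀ y ∈ t, key y = 0 ∨ key y = 1 ∨ key y = 2 := fun y hy => hl y (by simp [hy])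
    simp only [List.foldl_cons]
    rcases hx with hx | hx | hx
    · -- key x = 0: x goes to the end of a0
      have step : PySem.List.insertBy (fun a b => decide (key a < key b)) x (a0 ++ a1 ++ a2)
          = (a0 ++ [x]) ++ a1 ++ a2 := by
        rw [List.append_assoc, insertBy_pass _ x a0 (a1 ++ a2)
          (fun y hy => by simp [hx, h0 y hy])]
        rw [insertBy_front _ x (a1 ++ a2) (fun y hy => by
          rcases List.mem_append.mp hy with hy | hy
          · simp [hx, h1 y hy]
          · simp [hx, h2 y hy])]
        simp
      rw [step, ih (a0 ++ [x]) a1 a2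
        (by intro y hy; rcases List.mem_append.mp hy with hy | hy
            · exact h0 y hy
            · simp at hy; simpa [hy] using hx) h1 h2 ht]
      simp [hx]
    · -- key x = 1: x goes to the end of a1
      have step : PySem.List.insertBy (fun a b => decide (key a < key b)) x (a0 ++ a1 ++ a2)
          = a0 ++ (a1 ++ [x]) ++ a2 := by
        rw [insertBy_pass _ x (a0 ++ a1) a2 (fun y hy => by
          rcases List.mem_append.mp hy with hy | hy
          · simp [hx, h0 y hy]
          · simp [hx, h1 y hy])]
        rw [insertBy_front _ x a2 (fun y hy => by simp [hx, h2 y hy])]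
        simp
      rw [show a0 ++ a1 ++ a2 = (a0 ++ a1) ++ a2 by simp] at step
      rw [step, show a0 ++ (a1 ++ [x]) ++ a2 = a0 ++ (a1 ++ [x]) ++ a2 by rfl]
      rw [ih a0 (a1 ++ [x]) a2 h0
        (by intro y hy; rcases List.mem_append.mp hy with hy | hy
            · exact h1 y hy
            · simp at hy; simpa [hy] using hx) h2 ht]
      simp [hx]
    · -- key x = 2: x goes to the very end
      have step : PySem.List.insertBy (fun a b => decide (key a < key b)) x (a0 ++ a1 ++ a2)
          = a0 ++ a1 ++ (a2 ++ [x]) := by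
        rw [PySem.List.insertBy_of_forall_not_before _ x _ (fun y hy => by
          rcases List.mem_append.mp hy with hy | hy
          · rcases List.mem_append.mp hy with hy | hy
            · simp [hx, h0 y hy]
            · simp [hx, h1 y hy]
          · simp [hx, h2 y hy])]
        simp
      rw [step, show a0 ++ a1 ++ (a2 ++ [x]) = a0 ++ a1 ++ (a2 ++ [x]) by rfl]
      rw [ih a0 a1 (a2 ++ [x]) h0 h1
        (by intro y hy; rcases List.mem_append.mp hy with hy | hy
            · exact h2 y hy
            · simp at hy; simpa [hy] using hx) ht]
      simp [hx]

-- A's loop: the three buckets are the three filters (first matching branch wins)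
theorem bucketsA (zh k z : Int) :
    ∀ (l : List String) (a b c : List String),
      l.foldl (fun (st : List String × List String × List String) elem =>
        match pyOrd? elem with
        | some o =>
          if o = zh then (st.1 ++ [elem], st.2.1, st.2.2)
          else if o = k then (st.1, st.2.1 ++ [elem], st.2.2)
          else if o = z then (st.1, st.2.1, st.2.2 ++ [elem])
          else st
        | none => st) (a, b, c)
      = (a ++ l.filter (fun e => pyOrd? e == some zh),
         b ++ l.filter (fun e => pyOrd? e == some k && !(pyOrd? e == some zh)),
         c ++ l.filter (fun e => pyOrd? e == some z && !(pyOrd? e == some zh) && !(pyOrd? e == some k))) := by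
  intro l
  induction l with
  | nil => intro a b c; simp
  | cons x t ih =>
    intro a b c
    simp only [List.foldl_cons]
    cases hpo : pyOrd? x with
    | none => simp [ih, hpo]
    | some o =>
      by_cases h0 : o = zh
      · subst h0; simp [hpo, ih]
      · by_cases h1 : o = k
        · subst h1; simp [hpo, h0, ih]
        · by_cases h2 : o = z
          · subst h2; simp [hpo, h0, h1, ih]
          · simp [hpo, h0, h1, h2, ih]

-- lookup characterisation of B's rank dict (setdefault: the FIRST type wins)
theorem rank_get? (zh k z : Int) (o : Int) :
    ((((PySem.Dict.empty : PySem.Dict Int Int).setdefault zh 0).setdefault k 1).setdefault z 2).get? o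
      = (if o = zh then some 0 else if o = k then some 1 else if o = z then some 2 else none) := by
  by_cases h0 : o = zh
  · subst h0
    by_cases h2 : o = z
    · rw [← h2] at *
      rw [PySem.Dict.get?_setdefault_self]
      by_cases h1 : o = k
      · rw [← h1, PySem.Dict.get?_setdefault_self, PySem.Dict.get?_setdefault_self]
        simp [pysem]
      · rw [PySem.Dict.get?_setdefault_of_ne _ _ (fun h => h1 h), PySem.Dict.get?_setdefault_self]
        simp [pysem]
    · rw [PySem.Dict.get?_setdefault_of_ne _ _ (fun h => h2 h)]
      by_cases h1 : o = k
      · rw [← h1, PySem.Dict.get?_setdefault_self, PySem.Dict.get?_setdefault_self]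
        simp [pysem]
      · rw [PySem.Dict.get?_setdefault_of_ne _ _ (fun h => h1 h), PySem.Dict.get?_setdefault_self]
        simp [pysem]
  · by_cases h1 : o = k
    · subst h1
      by_cases h2 : o = z
      · rw [← h2, PySem.Dict.get?_setdefault_self, PySem.Dict.get?_setdefault_self,
          PySem.Dict.get?_setdefault_of_ne _ _ h0]
        simp [pysem, h0]
      · rw [PySem.Dict.get?_setdefault_of_ne _ _ (fun h => h2 h), PySem.Dict.get?_setdefault_self,
          PySem.Dict.get?_setdefault_of_ne _ _ h0]
        simp [pysem, h0]
    · by_cases h2 : o = z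
      · subst h2
        rw [PySem.Dict.get?_setdefault_self, PySem.Dict.get?_setdefault_of_ne _ _ h1,
          PySem.Dict.get?_setdefault_of_ne _ _ h0]
        simp [pysem, h0, h1]
      · rw [PySem.Dict.get?_setdefault_of_ne _ _ (fun h => h2 h),
          PySem.Dict.get?_setdefault_of_ne _ _ h1, PySem.Dict.get?_setdefault_of_ne _ _ h0]
        simp [pysem, h0, h1, h2]

theorem rank_contains (zh k z : Int) (o : Int) :
    ((((PySem.Dict.empty : PySem.Dict Int Int).setdefault zh 0).setdefault k 1).setdefault z 2).contains o
      = (o == zh || o == k || o == z) := by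
  rw [PySem.Dict.contains_setdefault, PySem.Dict.contains_setdefault, PySem.Dict.contains_setdefault]
  simp [pysem]
  cases hz : (o == z) <;> cases hk : (o == k) <;> cases hzh : (o == zh) <;> simp

-- the whole B-side pipeline equals A's three filters, for arbitrary zh k z
theorem bridge (zh k z : Int) (tickets : List String) :
    PySem.List.sorted
      (tickets.filter (fun e =>
        match pyOrd? e with
        | some o => ((((PySem.Dict.empty : PySem.Dict Int Int).setdefault zh 0).setdefault k 1).setdefault z 2).contains o
        | none => false))
      (fun e => ((((PySem.Dict.empty : PySem.Dict Int Int).setdefault zh 0).setdefault k 1).setdefault z 2).getD ((pyOrd? e).getD 0) 0) false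
    = tickets.filter (fun e => pyOrd? e == some zh)
      ++ tickets.filter (fun e => pyOrd? e == some k && !(pyOrd? e == some zh))
      ++ tickets.filter (fun e => pyOrd? e == some z && !(pyOrd? e == some zh) && !(pyOrd? e == some k)) := by
  have hkeys : ∀ x : String,
      ((((PySem.Dict.empty : PySem.Dict Int Int).setdefault zh 0).setdefault k 1).setdefault z 2).getD ((pyOrd? x).getD 0) 0 = 0 ∨
      ((((PySem.Dict.empty : PySem.Dict Int Int).setdefault zh 0).setdefault k 1).setdefault z 2).getD ((pyOrd? x).getD 0) 0 = 1 ∨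
      ((((PySem.Dict.empty : PySem.Dict Int Int).setdefault zh 0).setdefault k 1).setdefault z 2).getD ((pyOrd? x).getD 0) 0 = 2 := by
    intro x
    simp [PySem.Dict.getD_eq_get?_getD, rank_get?]
    split_ifs <;> simp
  rw [PySem.List.sorted_eq_foldl_insertBy]
  have h3 := sorted_three_aux
    (fun e => ((((PySem.Dict.empty : PySem.Dict Int Int).setdefault zh 0).setdefault k 1).setdefault z 2).getD ((pyOrd? e).getD 0) 0)
    (tickets.filter (fun e =>
      match pyOrd? e with
      | some o => ((((PySem.Dict.empty : PySem.Dict Int Int).setdefault zh 0).setdefault k 1).setdefault z 2).contains o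
      | none => false)) [] [] [] (by simp) (by simp) (by simp) (fun x _ => by simpa using hkeys x)
  simp only [List.nil_append, List.append_nil] at h3
  refine h3.trans ?_
  simp only [List.filter_filter, List.append_assoc]
  congr 1
  · apply List.filter_congr
    intro e _
    cases pyOrd? e with
    | none => simp
    | some o =>
      rw [Bool.eq_iff_iff]
      simp [rank_contains, PySem.Dict.getD_eq_get?_getD, rank_get?]
      by_cases h0 : o = zh <;> by_cases h1 : o = k <;> by_cases h2 : o = z <;>
        simp [h0, h1, h2] <;> (split_ifs <;> simp_all)
  congr 1
  · apply List.filter_congr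
    intro e _
    cases pyOrd? e with
    | none => simp
    | some o =>
      rw [Bool.eq_iff_iff]
      simp [rank_contains, PySem.Dict.getD_eq_get?_getD, rank_get?]
      by_cases h0 : o = zh <;> by_cases h1 : o = k <;> by_cases h2 : o = z <;>
        simp [h0, h1, h2] <;> (split_ifs <;> simp_all)
  · apply List.filter_congr
    intro e _
    cases pyOrd? e with
    | none => simp
    | some o =>
      rw [Bool.eq_iff_iff]
      simp [rank_contains, PySem.Dict.getD_eq_get?_getD, rank_get?]
      by_cases h0 : o = zh <;> by_cases h1 : o = k <;> by_cases h2 : o = z <;>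
        simp [h0, h1, h2] <;> (split_ifs <;> simp_all)

-- ===== VERDICT (by name: the statement is the Claim_ definition above) =====
theorem sorted_tickets_spec : Claim_equal_sorted_tickets := by
  intro types tickets _ hpre
  unfold Spec_sorted_tickets
  obtain ⟨hlen, -⟩ := hpre
  obtain ⟨c0, c1, c2, rest, hty⟩ : ∃ c0 c1 c2 rest, types.toList = c0 :: c1 :: c2 :: rest := by
    match h : types.toList, hlen with
    | c0 :: c1 :: c2 :: rest, _ => exact ⟨c0, c1, c2, rest, rfl⟩
  have hg0 : PySem.Str.pyGet? types 0 = some c0 := by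
    simp [PySem.Str.pyGet?, PySem.Chars.pyGet?, PySem.List.pyGet?, PySem.List.pyIdx?, hty]
    rw [if_pos (by omega)]; rfl
  have hg1 : PySem.Str.pyGet? types 1 = some c1 := by
    simp [PySem.Str.pyGet?, PySem.Chars.pyGet?, PySem.List.pyGet?, PySem.List.pyIdx?, hty]
    rw [if_pos (by omega)]; rfl
  have hg2 : PySem.Str.pyGet? types 2 = some c2 := by
    simp [PySem.Str.pyGet?, PySem.Chars.pyGet?, PySem.List.pyGet?, PySem.List.pyIdx?, hty]
    rw [if_pos (by omega)]; rfl
  unfold sorted_tickets sorted_tickets_alt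
  rw [hg0, hg1, hg2]
  have hrange : PySem.List.pyRange 0 3 1 = [0, 1, 2] := by decide
  rw [hrange]
  simp only [List.foldl_cons, List.foldl_nil, hg0, hg1, hg2]
  rw [bucketsA ((c0.toNat : Int)) ((c1.toNat : Int)) ((c2.toNat : Int)) tickets [] [] []]
  rw [bridge ((c0.toNat : Int)) ((c1.toNat : Int)) ((c2.toNat : Int)) tickets]
  simp
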